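-- pv_equiv track=rewrite | github.com/eymba/Sources-M-moires-ADN | testMémoireADN.py | PresenceErreur
-- ===== SOURCE A (Python) =====
-- def  PresenceErreur(sequence):
--     dna=["AT","TA","CG","GC"]
--     for i in range(0,len(sequence) - 1,2):
--         if (sequence[i]+sequence[i+1])  not in dna:
--
--             if i < len(sequence ) :
--
--                 if sequence[i]=="A" :
--                         sequence=sequence[:i+1]+"T"+sequence[i+2:]
--
--                 elif sequence[i]=="T" :
--                     sequence=sequence[:i+1]+"A"+sequence[i+2:]
--
--                 elif sequence[i]=="C" :
--                         sequence=sequence[:i+1]+"G"+sequence[i+2:]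
--
--                 elif sequence[i]=="G" :
--                     sequence=sequence[:i+1]+"C"+sequence[i+2:]
--     return sequence
-- ===== SOURCE B (Python) =====
-- def PresenceErreur(sequence):
--     comp = {'A': 'T', 'T': 'A', 'C': 'G', 'G': 'C'}
--     evens = sequence[0::2]
--     odds = sequence[1::2]
--     fixed = [comp.get(e, o) for e, o in zip(evens, odds)]
--     out = ''.join(e + o for e, o in zip(evens, fixed))
--     if len(sequence) % 2 == 1:
--         out += sequence[-1]
--     return out
-- ===== Notes on version B (the rewrite author's own statement) =====
-- stated objective: faster
-- what changed: A repeatedly rewrites the whole string in place inside an index loop over pairs; B splits the string into even/odd strands with strided slices, complements the odd strand via a dict lookup keyed by the even strand, and re-interleaves, appending the untouched trailing char for odd lengths.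
import Mathlib
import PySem

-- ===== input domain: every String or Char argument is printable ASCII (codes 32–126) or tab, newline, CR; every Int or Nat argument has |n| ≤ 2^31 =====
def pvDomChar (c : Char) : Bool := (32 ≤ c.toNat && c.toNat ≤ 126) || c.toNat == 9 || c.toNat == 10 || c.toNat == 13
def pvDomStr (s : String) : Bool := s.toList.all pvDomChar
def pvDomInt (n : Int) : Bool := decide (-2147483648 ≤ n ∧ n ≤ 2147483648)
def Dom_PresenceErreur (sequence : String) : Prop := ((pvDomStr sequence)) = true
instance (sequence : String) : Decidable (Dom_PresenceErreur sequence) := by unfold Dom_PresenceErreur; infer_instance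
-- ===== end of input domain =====

-- B restructures A's in-place pair-rewriting index loop into a strand split / complement / re-interleave pipeline (objective: alternative).

-- ===== PORT A =====
-- Python strings are handled as List Char; the two-char string sequence[i]+sequence[i+1] is the list [a, b].
-- One iteration of A's for-loop body (state = the current string, i = the loop index).
def stepA (s : List Char) (i : Int) : List Char :=
  match PySem.List.pyGet? s i, PySem.List.pyGet? s (i + 1) with
  | some a, some b =>
    if ¬ ([a, b] ∈ [['A','T'], ['T','A'], ['C','G'], ['G','C']]) then
      if i < (s.length : Int) then
        if a = 'A' then PySem.List.slice s none (some (i+1)) ++ ['T'] ++ PySem.List.slice s (some (i+2)) none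
        else if a = 'T' then PySem.List.slice s none (some (i+1)) ++ ['A'] ++ PySem.List.slice s (some (i+2)) none
        else if a = 'C' then PySem.List.slice s none (some (i+1)) ++ ['G'] ++ PySem.List.slice s (some (i+2)) none
        else if a = 'G' then PySem.List.slice s none (some (i+1)) ++ ['C'] ++ PySem.List.slice s (some (i+2)) none
        else s
      else s
    else s
  | _, _ => s  -- unreachable: i and i+1 are in range for every i of the loop's range

def PresenceErreur (sequence : String) : String :=
  String.ofList ((PySem.List.pyRange 0 ((sequence.toList.length : Int) - 1) 2).foldl stepA sequence.toList)

-- ===== PORT B =====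
-- comp = {'A': 'T', 'T': 'A', 'C': 'G', 'G': 'C'}
def compD : PySem.Dict Char Char := PySem.Dict.ofList [('A','T'), ('T','A'), ('C','G'), ('G','C')]

-- Strided slice xs[0::2]; hand-ported (exact for step 2 starting at 0 on any list).
def everyOther : List Char → List Char
  | a :: _ :: rest => a :: everyOther rest
  | [x] => [x]
  | [] => []

-- fixed = [comp.get(e, o) for e, o in zip(evens, odds)]; out = ''.join(e + o for e, o in zip(evens, fixed))
def strandFix (evens odds : List Char) : List Char :=
  (List.zip evens (List.map (fun p => (PySem.Dict.get? compD p.1).getD p.2) (List.zip evens odds))).flatMap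
    (fun p => [p.1, p.2])

-- B's body over List Char: split into strands, complement the odd strand, re-interleave, keep the trailing char.
def bList (s : List Char) : List Char :=
  if s.length % 2 = 1 then
    strandFix (everyOther s) (everyOther (s.drop 1)) ++ (PySem.List.pyGet? s (-1)).toList
  else
    strandFix (everyOther s) (everyOther (s.drop 1))

def PresenceErreur_alt (sequence : String) : String :=
  String.ofList (bList sequence.toList)

-- ===== PRECONDITION & SPEC =====
def Spec_PresenceErreur (sequence : String) (out : String) : Prop := out = PresenceErreur_alt sequence
instance (sequence : String) (out : String) : Decidable (Spec_PresenceErreur sequence out) := by unfold Spec_PresenceErreur; infer_instance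

-- ===== CLAIM (what is proved, stated in full; the proofs are below) =====
def Claim_equal_PresenceErreur : Prop := ∀ (sequence : String), Dom_PresenceErreur sequence → Spec_PresenceErreur sequence (PresenceErreur sequence)

-- ===== LEMMAS AND PROOFS =====

-- Common reference function: each pair (a, b) becomes (a, comp a) when a is a base, else stays.
def fixPairs : List Char → List Char
  | a :: b :: rest => a :: (PySem.Dict.get? compD a).getD b :: fixPairs rest
  | [x] => [x]
  | [] => []

theorem compGet_eq (a : Char) : PySem.Dict.get? compD a =
    if a = 'A' then some 'T' else if a = 'T' then some 'A' else if a = 'C' then some 'G'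
    else if a = 'G' then some 'C' else none := by
  rw [show compD = PySem.Dict.mk [('A','T'), ('T','A'), ('C','G'), ('G','C')] from rfl]
  simp only [PySem.Dict.get?_mk_cons, beq_iff_eq]
  by_cases hA : a = 'A'
  · subst hA; simp
  · rw [if_neg (fun h => hA h.symm), if_neg hA]
    by_cases hT : a = 'T'
    · subst hT; simp
    · rw [if_neg (fun h => hT h.symm), if_neg hT]
      by_cases hC : a = 'C'
      · subst hC; simp
      · rw [if_neg (fun h => hC h.symm), if_neg hC]
        by_cases hG : a = 'G'
        · subst hG; simp
        · rw [if_neg (fun h => hG h.symm), if_neg hG]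
          rfl

theorem pyRange_two_nil (a b : Int) (h : b ≤ a) : PySem.List.pyRange a b 2 = [] := by
  rw [PySem.List.pyRange_of_pos a b (by norm_num)]
  rw [if_neg (by omega)]
  simp

theorem pyRange_two_cons (a b : Int) (h : a < b) :
    PySem.List.pyRange a b 2 = a :: PySem.List.pyRange (a + 2) b 2 := by
  rw [PySem.List.pyRange_of_pos a b (by norm_num),
      PySem.List.pyRange_of_pos (a + 2) b (by norm_num), if_pos h]
  by_cases h2 : a + 2 < b
  · rw [if_pos h2]
    have key : ((b - a + 2 - 1) / 2).toNat = ((b - (a + 2) + 2 - 1) / 2).toNat + 1 := by omega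
    rw [key, List.range_succ_eq_map, List.map_cons, List.map_map]
    congr 1
    · norm_num
    · apply List.map_congr_left
      intro k _
      simp only [Function.comp_apply, Nat.succ_eq_add_one]
      push_cast
      ring
  · rw [if_neg h2]
    have key : ((b - a + 2 - 1) / 2).toNat = 1 := by omega
    rw [key]
    simp

theorem stepA_mid (done rest : List Char) (a b : Char) :
    stepA (done ++ a :: b :: rest) (done.length : Int)
      = done ++ a :: (PySem.Dict.get? compD a).getD b :: rest := by
  have hga : PySem.List.pyGet? (done ++ a :: b :: rest) (done.length : Int) = some a :=
    PySem.List.pyGet?_append_length done (b :: rest) a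
  have hgb : PySem.List.pyGet? (done ++ a :: b :: rest) ((done.length : Int) + 1) = some b := by
    have hsplit : done ++ a :: b :: rest = (done ++ [a]) ++ b :: rest := by simp
    rw [hsplit]
    have hl : (((done ++ [a]).length : Nat) : Int) = (done.length : Int) + 1 := by
      simp only [List.length_append, List.length_cons, List.length_nil]; push_cast; ring
    rw [← hl]
    exact PySem.List.pyGet?_append_length (done ++ [a]) rest b
  have htake : PySem.List.slice (done ++ a :: b :: rest) none (some ((done.length : Int) + 1))
      = done ++ [a] := by
    rw [show ((done.length : Int) + 1) = ((done.length + 1 : Nat) : Int) by push_cast; ring,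
        PySem.List.slice_to_natCast, List.take_append]
    simp
  have hdrop : PySem.List.slice (done ++ a :: b :: rest) (some ((done.length : Int) + 2)) none
      = rest := by
    rw [show ((done.length : Int) + 2) = ((done.length + 2 : Nat) : Int) by push_cast; ring,
        PySem.List.slice_from_natCast, List.drop_append]
    simp
  unfold stepA
  rw [hga, hgb]
  dsimp only
  by_cases hmem : [a, b] ∈ [['A','T'], ['T','A'], ['C','G'], ['G','C']]
  · rw [if_neg (not_not_intro hmem)]
    -- pair already complementary: b = comp a, so A leaves it and B's getD returns b
    have hmem' : a = 'A' ∧ b = 'T' ∨ a = 'T' ∧ b = 'A' ∨ a = 'C' ∧ b = 'G' ∨ a = 'G' ∧ b = 'C' := by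
      simpa using hmem
    rcases hmem' with ⟨ha, hb⟩ | ⟨ha, hb⟩ | ⟨ha, hb⟩ | ⟨ha, hb⟩ <;>
      (subst ha; subst hb; rw [compGet_eq]; simp)
  · rw [if_pos hmem]
    rw [if_pos (by simp only [List.length_append, List.length_cons]; push_cast; omega)]
    rw [compGet_eq]
    by_cases hA : a = 'A'
    · subst hA; rw [if_pos rfl, if_pos rfl, htake, hdrop]; simp
    · rw [if_neg hA, if_neg hA]
      by_cases hT : a = 'T'
      · subst hT; rw [if_pos rfl, if_pos rfl, htake, hdrop]; simp
      · rw [if_neg hT, if_neg hT]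
        by_cases hC : a = 'C'
        · subst hC; rw [if_pos rfl, if_pos rfl, htake, hdrop]; simp
        · rw [if_neg hC, if_neg hC]
          by_cases hG : a = 'G'
          · subst hG; rw [if_pos rfl, if_pos rfl, htake, hdrop]; simp
          · rw [if_neg hG, if_neg hG]; simp

theorem loopA_eq_fixPairs (todo done : List Char) :
    (PySem.List.pyRange (done.length : Int)
        ((done.length : Int) + (todo.length : Int) - 1) 2).foldl stepA (done ++ todo)
      = done ++ fixPairs todo := by
  induction todo using fixPairs.induct generalizing done with
  | case1 a b rest ih =>
    have hlen : (((a :: b :: rest).length : Nat) : Int) = (rest.length : Int) + 2 := by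
      simp only [List.length_cons]; push_cast; ring
    rw [pyRange_two_cons _ _ (by rw [hlen]; omega)]
    simp only [List.foldl_cons]
    rw [stepA_mid]
    rw [show done ++ a :: (PySem.Dict.get? compD a).getD b :: rest
        = (done ++ [a, (PySem.Dict.get? compD a).getD b]) ++ rest by simp]
    rw [show (done.length : Int) + (((a :: b :: rest).length : Nat) : Int) - 1
        = (((done ++ [a, (PySem.Dict.get? compD a).getD b]).length : Nat) : Int)
            + (rest.length : Int) - 1 by
      simp only [List.length_append, List.length_cons, List.length_nil]; push_cast; ring]
    rw [show (done.length : Int) + 2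
        = (((done ++ [a, (PySem.Dict.get? compD a).getD b]).length : Nat) : Int) by
      simp only [List.length_append, List.length_cons, List.length_nil]; push_cast; ring]
    rw [ih]
    simp [fixPairs]
  | case2 x =>
    rw [pyRange_two_nil _ _ (by simp only [List.length_cons, List.length_nil]; omega)]
    simp [fixPairs]
  | case3 =>
    rw [pyRange_two_nil _ _ (by simp only [List.length_nil]; omega)]
    simp [fixPairs]

theorem A_eq_fixPairs (s : List Char) :
    (PySem.List.pyRange 0 ((s.length : Int) - 1) 2).foldl stepA s = fixPairs s := by
  have h := loopA_eq_fixPairs s []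
  simpa using h

theorem strandFix_cons (a b : Char) (es os : List Char) :
    strandFix (a :: es) (b :: os)
      = a :: (PySem.Dict.get? compD a).getD b :: strandFix es os := by
  simp [strandFix]

theorem bList_eq_fixPairs (s : List Char) : bList s = fixPairs s := by
  induction s using fixPairs.induct with
  | case1 a b rest ih =>
    have he : everyOther (a :: b :: rest) = a :: everyOther rest := rfl
    have hd : (a :: b :: rest).drop 1 = b :: rest := rfl
    have hodds : everyOther (b :: rest) = b :: everyOther (rest.drop 1) := by
      cases rest with
      | nil => rfl
      | cons r rs => rfl
    unfold bList
    rw [hd, hodds, he, strandFix_cons]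
    have hpar : ((a :: b :: rest).length % 2 = 1) ↔ (rest.length % 2 = 1) := by
      simp only [List.length_cons]; omega
    unfold bList at ih
    by_cases hp : rest.length % 2 = 1
    · rw [if_pos (hpar.mpr hp)]
      rw [if_pos hp] at ih
      have hne : rest ≠ [] := by rintro rfl; simp at hp
      have hlast : PySem.List.pyGet? (a :: b :: rest) (-1) = PySem.List.pyGet? rest (-1) := by
        rw [PySem.List.pyGet?_neg_one, PySem.List.pyGet?_neg_one]
        cases rest with
        | nil => exact absurd rfl hne
        | cons r rs => rw [List.getLast?_cons_cons, List.getLast?_cons_cons]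
      rw [hlast]
      simp only [fixPairs, List.cons_append]
      rw [ih]
    · rw [if_neg (fun hh => hp (hpar.mp hh))]
      rw [if_neg hp] at ih
      simp only [fixPairs]
      rw [ih]
  | case2 x =>
    unfold bList
    rw [PySem.List.pyGet?_neg_one]
    simp [strandFix, everyOther, fixPairs]
  | case3 =>
    unfold bList
    simp [strandFix, everyOther, fixPairs]

-- ===== VERDICT (by name: the statement is the Claim_ definition above) =====
theorem PresenceErreur_spec : Claim_equal_PresenceErreur := by
  intro sequence _
  unfold Spec_PresenceErreur PresenceErreur PresenceErreur_alt
  rw [A_eq_fixPairs, bList_eq_fixPairs]
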